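-- pv_equiv track=rewrite | github.com/jasonhuh/UASCO | beads/beads.py | solve
-- ===== SOURCE A (Python) =====
-- def solve(txt):
--     def traverse(idx, color, dir):
--         res, cur = 0, idx
--         while cur >= 0 and cur < n:
--             if s[cur] == color or s[cur] == 'w':
--                 cur += dir
--                 res += 1
--             else:
--                 break
--         return res
--
--     s, n = txt*2, len(txt)*2
--     res, i = 0, 0
--     while i < n:
--         l, r = s[i-1], s[i]
--         left_leng, right_leng = 0, 0
--         if l == 'w': # Try both 'r' and 'b' and see which is bigger
--             left_leng = max(traverse(i-1, 'r', -1), traverse(i-1, 'b', -1))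
--         else:
--             left_leng = traverse(i-1, l, -1)
--
--         if r == 'w': # Try both 'r' and 'b' and see which is bigger
--             right_leng = max(traverse(i, 'r', 1), traverse(i, 'b', 1))
--         else:
--             right_leng = traverse(i, r, 1)
--
--         res = min(n//2, max(res, (left_leng + right_leng)))
--         i += 1
--     return res
-- ===== SOURCE B (Python) =====
-- def solve(txt):
--     # Linear-time: one right-to-left state sweep computes, for every suffix,
--     # the run length A finds by re-scanning; left runs come from the same
--     # sweep on the reversed string.
--     def runs(s):
--         # returns list R with R[i] = length of the bead run collectable
--         # rightwards starting at i (w tries both 'r' and 'b').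
--         out = []
--         w0, c0, g0 = 0, None, 0  # leading-'w' run of suffix, first non-w char, its run value
--         for ch in reversed(s):
--             if ch == 'w':
--                 w0 += 1
--                 out.append(w0 + (g0 if c0 in ('r', 'b') else 0))
--             else:
--                 g = 1 + w0 + (g0 if c0 == ch else 0)
--                 w0, c0, g0 = 0, ch, g
--                 out.append(g)
--         out.reverse()
--         return out
--
--     s = txt * 2
--     n = len(s)
--     R = runs(s)
--     Lrev = runs(s[::-1])  # Lrev[j] = run going left that ends at index n-1-j
--     half = n // 2
--     best = 0
--     for i in range(n):
--         v = (Lrev[n - i] if i > 0 else 0) + R[i]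
--         best = min(half, max(best, v))
--     return best
-- ===== Notes on version B (the rewrite author's own statement) =====
-- stated objective: faster
-- what changed: A re-scans the necklace from every breakpoint (quadratic); B precomputes, in one right-to-left state sweep per direction (tracking leading-'w' run, first non-'w' colour and its run value), the collectable run length at every position, then takes the capped maximum in a single pass.
import Mathlib
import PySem

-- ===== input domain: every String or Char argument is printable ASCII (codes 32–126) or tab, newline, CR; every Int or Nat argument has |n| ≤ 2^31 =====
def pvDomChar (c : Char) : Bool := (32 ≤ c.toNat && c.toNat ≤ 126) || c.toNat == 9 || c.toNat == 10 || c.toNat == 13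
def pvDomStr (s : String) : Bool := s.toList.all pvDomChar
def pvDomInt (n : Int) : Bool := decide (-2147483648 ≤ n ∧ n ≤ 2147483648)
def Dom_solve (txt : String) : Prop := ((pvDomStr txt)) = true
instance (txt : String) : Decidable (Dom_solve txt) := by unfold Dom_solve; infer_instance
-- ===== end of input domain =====

-- B replaces A's per-breakpoint rescans by one linear state sweep per direction (objective: faster, asymptotic).

-- ===== PORT A =====
-- A's inner 'traverse' (a while loop over cur); ported with fuel (n steps always
-- suffice: each iteration moves cur one step towards leaving [0,n)).  s[cur] is
-- always in range when read (the loop guard ensures 0 ≤ cur < n = len s), so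
-- pyGetD's default is never used.
def solveTraverse (s : List Char) (n : Int) (color : Char) (dir : Int) :
    Nat → Int → Int → Int
  | 0, _, res => res
  | fuel + 1, cur, res =>
    if 0 ≤ cur ∧ cur < n then
      if PySem.List.pyGetD s cur ' ' == color || PySem.List.pyGetD s cur ' ' == 'w' then
        solveTraverse s n color dir fuel (cur + dir) (res + 1)
      else res
    else res

-- the outer 'while i < n' loop, one body per i ∈ range(0, n)
def solve (txt : String) : Int :=
  let s : List Char := txt.toList ++ txt.toList          -- txt*2
  let n : Int := (PySem.Str.len txt) * 2                 -- len(txt)*2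
  (PySem.List.pyRange 0 n 1).foldl (fun res i =>
    let l := PySem.List.pyGetD s (i - 1) ' '             -- s[i-1] (Python wrap at i=0)
    let r := PySem.List.pyGetD s i ' '                   -- s[i]
    let left_leng :=
      if l == 'w' then
        max (solveTraverse s n 'r' (-1) n.toNat (i - 1) 0)
            (solveTraverse s n 'b' (-1) n.toNat (i - 1) 0)
      else solveTraverse s n l (-1) n.toNat (i - 1) 0
    let right_leng :=
      if r == 'w' then
        max (solveTraverse s n 'r' 1 n.toNat i 0)
            (solveTraverse s n 'b' 1 n.toNat i 0)
      else solveTraverse s n r 1 n.toNat i 0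
    min (PySem.Int.floordiv n 2) (max res (left_leng + right_leng))) 0

-- ===== PORT B =====
-- one step of B's sweep: state (w0, c0, g0) = leading-'w' run of the suffix,
-- its first non-'w' char, and the run value at that char; out accumulates entries
def solveAltStep (acc : (Int × Option Char × Int) × List Int) (ch : Char) :
    (Int × Option Char × Int) × List Int :=
  let st := acc.1
  let out := acc.2
  let w0 := st.1
  let c0 := st.2.1
  let g0 := st.2.2
  if ch == 'w' then
    ((w0 + 1, c0, g0),
     out ++ [w0 + 1 + (if c0 == some 'r' || c0 == some 'b' then g0 else 0)])
  else
    let g := 1 + w0 + (if c0 == some ch then g0 else 0)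
    ((0, some ch, g), out ++ [g])

-- B's runs(s): the 'for ch in reversed(s)' loop, then out.reverse()
def solveAltRuns (s : List Char) : List Int :=
  ((s.reverse.foldl solveAltStep ((0, none, 0), [])).2).reverse

def solve_alt (txt : String) : Int :=
  let s : List Char := txt.toList ++ txt.toList
  let n : Int := (s.length : Int)
  let R := solveAltRuns s
  let Lrev := solveAltRuns s.reverse                     -- runs(s[::-1])
  let half := PySem.Int.floordiv n 2
  (PySem.List.pyRange 0 n 1).foldl (fun best i =>
    let v := (if 0 < i then PySem.List.pyGetD Lrev (n - i) 0 else 0)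
             + PySem.List.pyGetD R i 0                   -- indices always in range
    min half (max best v)) 0

-- ===== PRECONDITION & SPEC =====
def Spec_solve (txt : String) (out : Int) : Prop := out = solve_alt txt
instance (txt : String) (out : Int) : Decidable (Spec_solve txt out) := by
  unfold Spec_solve; infer_instance

-- ===== CLAIM (what is proved, stated in full; the proofs are below) =====
def Claim_equal_solve : Prop := ∀ (txt : String), Dom_solve txt → Spec_solve txt (solve txt)

-- ===== LEMMAS AND PROOFS =====

-- number of beads collectable rightwards from the head of u with colour c ('w' matches too)
def cntRW (c : Char) : List Char → Int
  | [] => 0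
  | ch :: t => if ch == c || ch == 'w' then cntRW c t + 1 else 0

-- the run length A's body computes at the head of u (empty: 0)
def rightLen : List Char → Int
  | [] => 0
  | ch :: t =>
    if ch == 'w' then max (cntRW 'r' (ch :: t)) (cntRW 'b' (ch :: t))
    else cntRW ch (ch :: t)

-- spec list: rightLen of every suffix
def rlist : List Char → List Int
  | [] => []
  | ch :: t => rightLen (ch :: t) :: rlist t

-- B's foldl over the reversed list, as a foldr
def stScan (l : List Char) : (Int × Option Char × Int) × List Int :=
  l.foldr (fun ch acc => solveAltStep acc ch) ((0, none, 0), [])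

-- the sweep invariant
lemma cntRW_cons_pos (c ch : Char) (t : List Char) (h : (ch == c || ch == 'w') = true) :
    cntRW c (ch :: t) = cntRW c t + 1 := by simp [cntRW, h]

lemma cntRW_cons_neg (c ch : Char) (t : List Char) (h : (ch == c || ch == 'w') = false) :
    cntRW c (ch :: t) = 0 := by simp [cntRW, h]

lemma stScan_inv (l : List Char) :
    (∀ c : Char, c ≠ 'w' →
      cntRW c l = (stScan l).1.1 +
        (if ((stScan l).1.2.1 == some c) = true then (stScan l).1.2.2 else 0))
    ∧ 0 ≤ (stScan l).1.1 ∧ 0 ≤ (stScan l).1.2.2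
    ∧ (stScan l).2 = (rlist l).reverse := by
  induction l with
  | nil => simp [stScan, rlist, cntRW]
  | cons ch t ih =>
    obtain ⟨h1, hw0, hg0, h2⟩ := ih
    have hstep : stScan (ch :: t) = solveAltStep (stScan t) ch := rfl
    by_cases hch : ch = 'w'
    · subst hch
      have hstep' : stScan ('w' :: t) =
          (((stScan t).1.1 + 1, (stScan t).1.2.1, (stScan t).1.2.2),
           (stScan t).2 ++ [(stScan t).1.1 + 1 +
             (if ((stScan t).1.2.1 == some 'r' || (stScan t).1.2.1 == some 'b') = true
              then (stScan t).1.2.2 else 0)]) := by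
        rw [hstep]; simp [solveAltStep]
      refine ⟨?_, ?_, ?_, ?_⟩
      · intro c hc
        have hv := h1 c hc
        rw [cntRW_cons_pos c 'w' t (by simp), hstep']
        dsimp only
        omega
      · rw [hstep']; dsimp only; omega
      · rw [hstep']; dsimp only; exact hg0
      · rw [hstep']
        dsimp only
        simp only [rlist, List.reverse_cons, h2]
        congr 1
        have hr := h1 'r' (by decide)
        have hb := h1 'b' (by decide)
        have hcr : cntRW 'r' ('w' :: t) = cntRW 'r' t + 1 := cntRW_cons_pos _ _ _ (by simp)
        have hcb : cntRW 'b' ('w' :: t) = cntRW 'b' t + 1 := cntRW_cons_pos _ _ _ (by simp)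
        simp only [rightLen, hcr, hcb]
        rcases hc0 : (stScan t).1.2.1 with _ | c
        · simp [hc0] at hr hb ⊢; omega
        · by_cases hcrr : c = 'r'
          · subst hcrr; simp [hc0] at hr hb ⊢; omega
          · by_cases hcbb : c = 'b'
            · subst hcbb; simp [hc0] at hr hb ⊢; omega
            · simp [hc0, hcrr, hcbb] at hr hb ⊢; omega
    · have hstep' : stScan (ch :: t) =
          ((0, some ch, 1 + (stScan t).1.1 +
              (if ((stScan t).1.2.1 == some ch) = true then (stScan t).1.2.2 else 0)),
           (stScan t).2 ++ [1 + (stScan t).1.1 +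
              (if ((stScan t).1.2.1 == some ch) = true then (stScan t).1.2.2 else 0)]) := by
        rw [hstep]; simp [solveAltStep, hch]
      have hself : cntRW ch (ch :: t) = 1 + (stScan t).1.1 +
          (if ((stScan t).1.2.1 == some ch) = true then (stScan t).1.2.2 else 0) := by
        rw [cntRW_cons_pos ch ch t (by simp)]
        have := h1 ch hch
        omega
      refine ⟨?_, ?_, ?_, ?_⟩
      · intro c hc
        rw [hstep']
        dsimp only
        by_cases hcc : c = ch
        · subst hcc
          simp only [beq_self_eq_true, if_pos]
          simpa using hself
        · have hne : ¬ (ch = c) := fun h => hcc h.symm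
          have hm : (ch == c || ch == 'w') = false := by simp [hch, hne]
          rw [cntRW_cons_neg c ch t hm]
          simp [hne]
      · rw [hstep']
      · rw [hstep']; dsimp only; split <;> omega
      · rw [hstep']
        dsimp only
        simp only [rlist, List.reverse_cons, h2]
        congr 1
        have hf : (ch == 'w') = false := by simp [hch]
        simp only [rightLen, hf, Bool.false_eq_true, if_false]
        exact congrArg (fun x => [x]) hself.symm

lemma solveAltRuns_eq (s : List Char) : solveAltRuns s = rlist s := by
  have h : s.reverse.foldl solveAltStep ((0, none, 0), []) = stScan s := by
    rw [List.foldl_reverse]; rfl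
  rw [solveAltRuns, h, (stScan_inv s).2.2.2, List.reverse_reverse]

lemma rlist_length (l : List Char) : (rlist l).length = l.length := by
  induction l with
  | nil => rfl
  | cons ch t ih => simp [rlist, ih]

lemma rlist_getElem (l : List Char) (i : Nat) (h : i < l.length) :
    (rlist l)[i]'(by rw [rlist_length]; exact h) = rightLen (l.drop i) := by
  induction l generalizing i with
  | nil => simp at h
  | cons ch t ih =>
    cases i with
    | zero => simp [rlist]
    | succ j => simp only [rlist, List.getElem_cons_succ, List.drop_succ_cons]
                exact ih j (by simpa using h)

-- A's rightward traverse counts the matching prefix of the suffix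
lemma traverse_right (s : List Char) (c : Char) :
    ∀ (fuel : Nat) (i res : Int), 0 ≤ i → ((s.length : Int) - i).toNat ≤ fuel →
      solveTraverse s (s.length : Int) c 1 fuel i res = res + cntRW c (s.drop i.toNat) := by
  intro fuel
  induction fuel with
  | zero =>
    intro i res hi hf
    have hge : (s.length : Int) ≤ i := by omega
    have : s.length ≤ i.toNat := by omega
    simp [solveTraverse, List.drop_eq_nil_of_le this, cntRW]
  | succ fuel ih =>
    intro i res hi hf
    by_cases hlt : i < (s.length : Int)
    · have hnat : i.toNat < s.length := by omega
      have hdrop : s.drop i.toNat = s[i.toNat] :: s.drop (i.toNat + 1) :=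
        List.drop_eq_getElem_cons hnat
      have hget : PySem.List.pyGetD s i ' ' = s[i.toNat] :=
        PySem.List.pyGetD_eq_getElem s ' ' hi hlt
      simp only [solveTraverse, if_pos (And.intro hi hlt), hget]
      by_cases hm : (s[i.toNat] == c || s[i.toNat] == 'w') = true
      · rw [if_pos hm, ih (i + 1) (res + 1) (by omega) (by omega), hdrop,
          cntRW_cons_pos c _ _ hm]
        have : (i + 1).toNat = i.toNat + 1 := by omega
        rw [this]; ring
      · rw [if_neg hm, hdrop, cntRW_cons_neg c _ _ (by simpa using hm)]
        omega
    · have : s.length ≤ i.toNat := by omega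
      simp [solveTraverse, hlt, List.drop_eq_nil_of_le this, cntRW]

-- A's leftward traverse counts the matching reversed prefix ending at j
lemma traverse_left (s : List Char) (c : Char) :
    ∀ (fuel : Nat) (j res : Int), j < (s.length : Int) → (j + 1).toNat ≤ fuel →
      solveTraverse s (s.length : Int) c (-1) fuel j res
        = res + cntRW c ((s.take (j + 1).toNat).reverse) := by
  intro fuel
  induction fuel with
  | zero =>
    intro j res hj hf
    have : (j + 1).toNat = 0 := by omega
    simp [solveTraverse, this, cntRW]
  | succ fuel ih =>
    intro j res hj hf
    by_cases h0 : 0 ≤ j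
    · have hnat : j.toNat < s.length := by omega
      have hget : PySem.List.pyGetD s j ' ' = s[j.toNat] :=
        PySem.List.pyGetD_eq_getElem s ' ' h0 hj
      have htake : (s.take (j + 1).toNat).reverse = s[j.toNat] :: (s.take j.toNat).reverse := by
        have h1 : (j + 1).toNat = j.toNat + 1 := by omega
        rw [h1, List.take_add_one, List.reverse_append]
        simp [List.getElem?_eq_getElem hnat]
      simp only [solveTraverse, if_pos (And.intro h0 hj), hget]
      by_cases hm : (s[j.toNat] == c || s[j.toNat] == 'w') = true
      · rw [if_pos hm, ih (j + -1) (res + 1) (by omega) (by omega), htake,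
          cntRW_cons_pos c _ _ hm]
        have : (j + -1 + 1).toNat = j.toNat := by omega
        rw [this]; ring
      · rw [if_neg hm, htake, cntRW_cons_neg c _ _ (by simpa using hm)]
        omega
    · have : (j + 1).toNat = 0 := by omega
      simp [solveTraverse, h0, this, cntRW]

lemma take_reverse_drop (s : List Char) (k : Nat) :
    (s.take k).reverse = s.reverse.drop (s.length - k) := by
  symm
  calc s.reverse.drop (s.length - k)
      = ((s.take k ++ s.drop k).reverse).drop (s.length - k) := by
        rw [List.take_append_drop]
    _ = ((s.drop k).reverse ++ (s.take k).reverse).drop ((s.drop k).reverse.length) := by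
        rw [List.reverse_append]
        congr 1
        simp
    _ = (s.take k).reverse := by simp

-- A's loop body equals B's loop body at every index of the range
lemma body_eq (s : List Char) (i acc : Int) (h0 : 0 ≤ i) (h1 : i < (s.length : Int)) :
    (min (PySem.Int.floordiv (s.length : Int) 2) (max acc
      ((if (PySem.List.pyGetD s (i - 1) ' ' == 'w') = true then
          max (solveTraverse s (s.length : Int) 'r' (-1) ((s.length : Int)).toNat (i - 1) 0)
              (solveTraverse s (s.length : Int) 'b' (-1) ((s.length : Int)).toNat (i - 1) 0)
        else solveTraverse s (s.length : Int) (PySem.List.pyGetD s (i - 1) ' ') (-1)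
              ((s.length : Int)).toNat (i - 1) 0) +
       (if (PySem.List.pyGetD s i ' ' == 'w') = true then
          max (solveTraverse s (s.length : Int) 'r' 1 ((s.length : Int)).toNat i 0)
              (solveTraverse s (s.length : Int) 'b' 1 ((s.length : Int)).toNat i 0)
        else solveTraverse s (s.length : Int) (PySem.List.pyGetD s i ' ') 1
              ((s.length : Int)).toNat i 0))))
    = min (PySem.Int.floordiv (s.length : Int) 2) (max acc
      ((if 0 < i then PySem.List.pyGetD (solveAltRuns s.reverse) ((s.length : Int) - i) 0 else 0)
       + PySem.List.pyGetD (solveAltRuns s) i 0)) := by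
  have hnat : i.toNat < s.length := by omega
  have hfuel : ((s.length : Int)).toNat = s.length := by omega
  -- right side
  have hdrop : s.drop i.toNat = s[i.toNat] :: s.drop (i.toNat + 1) :=
    List.drop_eq_getElem_cons hnat
  have hgetr : PySem.List.pyGetD s i ' ' = s[i.toNat] :=
    PySem.List.pyGetD_eq_getElem s ' ' h0 h1
  have hRlen : (rlist s).length = s.length := rlist_length s
  have hRget : PySem.List.pyGetD (solveAltRuns s) i 0 = rightLen (s.drop i.toNat) := by
    rw [solveAltRuns_eq]
    rw [PySem.List.pyGetD_eq_getElem (rlist s) 0 h0 (by rw [hRlen]; exact h1)]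
    exact rlist_getElem s i.toNat hnat
  have hR : (if (PySem.List.pyGetD s i ' ' == 'w') = true then
          max (solveTraverse s (s.length : Int) 'r' 1 ((s.length : Int)).toNat i 0)
              (solveTraverse s (s.length : Int) 'b' 1 ((s.length : Int)).toNat i 0)
        else solveTraverse s (s.length : Int) (PySem.List.pyGetD s i ' ') 1
              ((s.length : Int)).toNat i 0)
      = PySem.List.pyGetD (solveAltRuns s) i 0 := by
    rw [hRget, hgetr]
    rw [traverse_right s 'r' _ i 0 h0 (by omega),
        traverse_right s 'b' _ i 0 h0 (by omega),
        traverse_right s s[i.toNat] _ i 0 h0 (by omega)]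
    rw [hdrop]
    by_cases hw : (s[i.toNat] == 'w') = true
    · rw [if_pos hw, rightLen]
      have : s[i.toNat] = 'w' := by simpa using hw
      rw [this]
      simp
    · rw [if_neg hw, rightLen, if_neg hw]
      omega
  rw [hR]
  -- left side
  congr 2
  by_cases hi0 : 0 < i
  · rw [if_pos hi0]
    obtain ⟨m, hm⟩ : ∃ m, i.toNat = m + 1 := ⟨i.toNat - 1, by omega⟩
    have hnat1 : m < s.length := by omega
    have hgetl : PySem.List.pyGetD s (i - 1) ' ' = s[m]'hnat1 := by
      rw [PySem.List.pyGetD_eq_getElem s ' ' (i := i - 1) (by omega) (by omega)]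
      congr 1
      omega
    have htake : (s.take (m + 1)).reverse = s[m]'hnat1 :: (s.take m).reverse := by
      rw [List.take_add_one, List.reverse_append]
      simp [List.getElem?_eq_getElem hnat1]
    have hrev : (s.take i.toNat).reverse = s.reverse.drop (((s.length : Int) - i)).toNat := by
      rw [take_reverse_drop]
      congr 1
      omega
    have hLget : PySem.List.pyGetD (solveAltRuns s.reverse) ((s.length : Int) - i) 0
        = rightLen ((s.take i.toNat).reverse) := by
      rw [solveAltRuns_eq, hrev]
      rw [PySem.List.pyGetD_eq_getElem (rlist s.reverse) 0 (by omega)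
        (by rw [rlist_length]; simp; omega)]
      exact rlist_getElem s.reverse (((s.length : Int) - i)).toNat (by simp; omega)
    have htn : (i - 1 + 1).toNat = i.toNat := by omega
    rw [hLget]
    rw [traverse_left s 'r' _ (i - 1) 0 (by omega) (by omega),
        traverse_left s 'b' _ (i - 1) 0 (by omega) (by omega),
        traverse_left s (PySem.List.pyGetD s (i - 1) ' ') _ (i - 1) 0 (by omega) (by omega)]
    rw [htn, hgetl, hm, htake]
    by_cases hw : (s[m]'hnat1 == 'w') = true
    · rw [if_pos hw, rightLen]
      have : s[m]'hnat1 = 'w' := by simpa using hw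
      rw [this]
      simp
    · rw [if_neg hw, rightLen, if_neg hw]
      omega
  · have hi : i = 0 := by omega
    subst hi
    rw [if_neg hi0]
    rw [traverse_left s 'r' _ (0 - 1) 0 (by omega) (by omega),
        traverse_left s 'b' _ (0 - 1) 0 (by omega) (by omega),
        traverse_left s (PySem.List.pyGetD s (0 - 1) ' ') _ (0 - 1) 0 (by omega) (by omega)]
    have : ((0 : Int) - 1 + 1).toNat = 0 := by omega
    rw [this]
    simp [cntRW]

-- ===== VERDICT (by name: the statement is the Claim_ definition above) =====
theorem solve_spec : Claim_equal_solve := by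
  intro txt _
  show solve txt = solve_alt txt
  simp only [solve, solve_alt]
  have hn : PySem.Str.len txt * 2 = (((txt.toList ++ txt.toList).length : Nat) : Int) := by
    simp
    ring
  rw [hn]
  generalize txt.toList ++ txt.toList = s
  refine List.foldl_ext _ _ 0 ?_
  intro acc i hi
  obtain ⟨h0, h1⟩ := (PySem.List.mem_pyRange_one).mp hi
  exact body_eq s i acc h0 h1
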